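-- pv_equiv track=rewrite | github.com/vodkar/llm_scanner | llm_scanner/services/benchmark/cvefixes_loader.py | _collapse_lines_to_spans
-- ===== SOURCE A (Python) =====
-- def _collapse_lines_to_spans(lines: list[int]) -> list[tuple[int, int]]:
--     if not lines:
--         return []
--
--     unique_sorted_lines = sorted(set(lines))
--     spans: list[tuple[int, int]] = []
--
--     span_start = unique_sorted_lines[0]
--     span_end = unique_sorted_lines[0]
--     for line in unique_sorted_lines[1:]:
--         if line == span_end + 1:
--             span_end = line
--             continue
--         spans.append((span_start, span_end))
--         span_start = line
--         span_end = line
--     spans.append((span_start, span_end))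
--
--     return spans
-- ===== SOURCE B (Python) =====
-- from itertools import groupby
--
--
-- def _collapse_lines_to_spans(lines: list[int]) -> list[tuple[int, int]]:
--     spans: list[tuple[int, int]] = []
--     for _, grp in groupby(enumerate(sorted(set(lines))), key=lambda p: p[1] - p[0]):
--         g = list(grp)
--         spans.append((g[0][1], g[-1][1]))
--     return spans
-- ===== Notes on version B (the rewrite author's own statement) =====
-- stated objective: idiomatic
-- what changed: Replaces the explicit running-endpoint accumulator loop with itertools.groupby over enumerate(sorted(set(lines))) keyed by value-minus-index, which groups consecutive runs; each group's first and last values form the span.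
import Mathlib
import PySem

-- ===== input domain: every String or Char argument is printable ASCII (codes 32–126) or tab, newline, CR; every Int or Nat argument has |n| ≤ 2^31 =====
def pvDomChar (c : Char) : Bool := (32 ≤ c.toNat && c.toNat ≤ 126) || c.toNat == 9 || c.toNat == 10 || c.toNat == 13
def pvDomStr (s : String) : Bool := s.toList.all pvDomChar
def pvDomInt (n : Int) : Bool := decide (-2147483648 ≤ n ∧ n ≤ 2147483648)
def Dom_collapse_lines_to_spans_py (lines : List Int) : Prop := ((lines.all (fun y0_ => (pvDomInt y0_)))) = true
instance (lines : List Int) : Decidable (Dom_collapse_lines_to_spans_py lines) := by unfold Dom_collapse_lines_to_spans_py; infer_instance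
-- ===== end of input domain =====

-- B replaces A's running-endpoint accumulator loop by a groupby-style grouping of
-- enumerate(sorted(set(lines))) keyed by value-minus-index (idiomatic; same cost).

-- ===== PORT A =====
def collapse_lines_to_spans_py (lines : List Int) : List (Int × Int) :=
  if lines = [] then []
  else
    match PySem.List.sorted (PySem.Set.ofList lines) (fun x => x) false with
    | [] => []  -- unreachable: sorted(set(lines)) is nonempty when lines is
    | h :: t =>
      let st := t.foldl
        (fun (acc : List (Int × Int) × Int × Int) line =>
          if line = acc.2.2 + 1 then (acc.1, acc.2.1, line)
          else (acc.1 ++ [(acc.2.1, acc.2.2)], line, line)) ([], h, h)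
      st.1 ++ [(st.2.1, st.2.2)]

-- ===== PORT B =====
-- itertools.groupby: maximal runs of elements with equal key, in order
def pvGroupByKey (key : Int × Int → Int) : List (Int × Int) → List (List (Int × Int))
  | [] => []
  | x :: xs =>
    (x :: xs.takeWhile (fun y => key y == key x)) ::
      pvGroupByKey key (xs.dropWhile (fun y => key y == key x))
termination_by l => l.length
decreasing_by
  simpa [Nat.lt_succ_iff] using List.length_dropWhile_le (fun y => key y == key _) _

def collapse_lines_to_spans_py_alt (lines : List Int) : List (Int × Int) :=
  (pvGroupByKey (fun p => p.2 - p.1)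
      (PySem.List.enumerate (PySem.List.sorted (PySem.Set.ofList lines) (fun x => x) false))).map
    (fun g => ((g.headD (0, 0)).2, (g.getLastD (0, 0)).2))

-- ===== PRECONDITION & SPEC =====
def Spec_collapse_lines_to_spans_py (lines : List Int) (out : List (Int × Int)) : Prop := out = collapse_lines_to_spans_py_alt lines
instance (lines : List Int) (out : List (Int × Int)) : Decidable (Spec_collapse_lines_to_spans_py lines out) := by unfold Spec_collapse_lines_to_spans_py; infer_instance

-- ===== CLAIM (what is proved, stated in full; the proofs are below) =====
def Claim_equal_collapse_lines_to_spans_py : Prop := ∀ (lines : List Int), Dom_collapse_lines_to_spans_py lines → Spec_collapse_lines_to_spans_py lines (collapse_lines_to_spans_py lines)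

-- ===== LEMMAS AND PROOFS =====

-- reference shape: spans of the tail t after a current span [s, e]
def pvRunsGo (s e : Int) : List Int → List (Int × Int)
  | [] => [(s, e)]
  | y :: ys => if y = e + 1 then pvRunsGo s y ys else (s, e) :: pvRunsGo y y ys

theorem pv_foldA (t : List Int) : ∀ (spans : List (Int × Int)) (s e : Int),
    (t.foldl
        (fun (acc : List (Int × Int) × Int × Int) line =>
          if line = acc.2.2 + 1 then (acc.1, acc.2.1, line)
          else (acc.1 ++ [(acc.2.1, acc.2.2)], line, line)) (spans, s, e)).1
      ++ [((t.foldl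
        (fun (acc : List (Int × Int) × Int × Int) line =>
          if line = acc.2.2 + 1 then (acc.1, acc.2.1, line)
          else (acc.1 ++ [(acc.2.1, acc.2.2)], line, line)) (spans, s, e)).2.1,
          (t.foldl
        (fun (acc : List (Int × Int) × Int × Int) line =>
          if line = acc.2.2 + 1 then (acc.1, acc.2.1, line)
          else (acc.1 ++ [(acc.2.1, acc.2.2)], line, line)) (spans, s, e)).2.2)]
    = spans ++ pvRunsGo s e t := by
  induction t with
  | nil => intro spans s e; simp [pvRunsGo]
  | cons y ys ih =>
    intro spans s e
    by_cases h : y = e + 1 <;> simp [List.foldl, pvRunsGo, h, ih]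

theorem pvGroupByKey_nil (key : Int × Int → Int) : pvGroupByKey key [] = [] := by
  rw [pvGroupByKey]

theorem pv_groupM (t : List Int) : ∀ (i e s : Int),
    (s, (((i, e) :: (PySem.List.enumerate t (i+1)).takeWhile (fun p => p.2 - p.1 == e - i)).getLastD (0, 0)).2)
      :: ((pvGroupByKey (fun p => p.2 - p.1)
            ((PySem.List.enumerate t (i+1)).dropWhile (fun p => p.2 - p.1 == e - i))).map
          (fun g => ((g.headD (0, 0)).2, (g.getLastD (0, 0)).2)))
    = pvRunsGo s e t := by
  induction t with
  | nil =>
    intro i e s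
    simp only [PySem.List.enumerate_nil, List.takeWhile_nil, List.dropWhile_nil,
      pvGroupByKey_nil, List.map_nil, List.getLastD_cons, List.getLastD_nil, pvRunsGo]
  | cons y ys ih =>
    intro i e s
    rw [PySem.List.enumerate_cons]
    by_cases h : y = e + 1
    · rw [show e - i = y - (i+1) from by omega]
      simp only [List.takeWhile_cons, List.dropWhile_cons, beq_self_eq_true, if_true,
        List.getLastD_cons]
      have H := ih (i+1) y s
      simp only [List.getLastD_cons] at H
      rw [H]
      simp [pvRunsGo, h]
    · have hkf : (y - (i + 1) == e - i) = false := beq_eq_false_iff_ne.mpr (by omega)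
      simp only [List.takeWhile_cons, List.dropWhile_cons, hkf, Bool.false_eq_true, if_false]
      rw [pvGroupByKey]
      simp only [List.map_cons, List.headD_cons, List.getLastD_cons, List.getLastD_nil]
      have H := ih (i+1) y y
      simp only [List.getLastD_cons] at H
      rw [H]
      simp [pvRunsGo, h]

-- ===== VERDICT (by name: the statement is the Claim_ definition above) =====
theorem collapse_lines_to_spans_py_spec : Claim_equal_collapse_lines_to_spans_py := by
  intro lines _
  unfold Spec_collapse_lines_to_spans_py collapse_lines_to_spans_py collapse_lines_to_spans_py_alt
  by_cases hl : lines = []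
  · subst hl
    rw [show (PySem.List.sorted (PySem.Set.ofList ([] : List Int)) (fun x => x) false) = [] from rfl]
    simp [PySem.List.enumerate_nil, pvGroupByKey_nil]
  · simp only [hl, if_false]
    have hne : PySem.List.sorted (PySem.Set.ofList lines) (fun x => x) false ≠ [] := by
      intro heq
      rcases List.exists_mem_of_ne_nil lines hl with ⟨a, ha⟩
      have hmem : a ∈ PySem.Set.ofList lines := by simpa [PySem.Set.mem_ofList] using ha
      have h0 : (PySem.Set.ofList lines : List Int) = [] := by
        exact (PySem.List.sorted_eq_nil_iff _ _ _).mp heq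
      rw [h0] at hmem
      simp at hmem
    cases hu : PySem.List.sorted (PySem.Set.ofList lines) (fun x => x) false with
    | nil => exact absurd hu hne
    | cons h t =>
      dsimp only
      rw [pv_foldA t [] h h]
      rw [PySem.List.enumerate_cons, pvGroupByKey]
      dsimp only
      simp only [List.map_cons, List.headD_cons]
      rw [pv_groupM t 0 h h]
      simp
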